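-- pv_equiv track=rewrite | github.com/horimpark/code-playground | codewars/6kyu/The Supermarket Queue.py | queue_time
-- ===== SOURCE A (Python) =====
-- def queue_time(customers, n):
--     if n == 1:
--         return sum(customers)
--     if n >= len(customers):
--         return max(customers)
--     queue = [0] * n
--     for customer in customers:
--         queue[queue.index(min(queue))] += customer
--     return max(queue)
-- ===== SOURCE B (Python) =====
-- def queue_time(customers, n):
--     if n == 1:
--         return sum(customers)
--     if n >= len(customers):
--         return max(customers)
--     loads = [0] * n  # kept sorted ascending: loads[0] is the shortest till
--     for c in customers:
--         t = loads[0] + c          # the shortest till takes this customer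
--         rest = loads[1:]
--         i = 0                     # insertion point keeping `rest` sorted
--         while i < len(rest) and rest[i] < t:
--             i += 1
--         loads = rest[:i] + [t] + rest[i:]
--     return loads[-1]              # largest finish time
-- ===== Notes on version B (the rewrite author's own statement) =====
-- stated objective: alternative
-- what changed: Instead of rescanning the whole till array with min() and list.index() for every customer, B keeps the till loads as a sorted list: the shortest till is always loads[0], and its new finish time is re-inserted at its sorted position, so the two full scans per customer disappear.
import Mathlib
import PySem

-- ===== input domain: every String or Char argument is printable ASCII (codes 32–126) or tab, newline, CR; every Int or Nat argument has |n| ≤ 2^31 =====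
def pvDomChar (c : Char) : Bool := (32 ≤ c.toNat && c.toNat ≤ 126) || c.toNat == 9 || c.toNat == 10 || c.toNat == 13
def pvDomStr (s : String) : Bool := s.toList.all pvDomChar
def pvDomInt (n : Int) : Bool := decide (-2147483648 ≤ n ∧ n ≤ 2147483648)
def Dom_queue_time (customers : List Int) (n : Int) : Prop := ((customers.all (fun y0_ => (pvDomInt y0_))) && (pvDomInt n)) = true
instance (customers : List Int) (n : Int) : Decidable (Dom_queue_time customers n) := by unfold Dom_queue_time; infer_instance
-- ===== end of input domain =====

-- B keeps the till loads as a sorted list (shortest till = head, re-inserted at its sorted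
-- position) instead of rescanning the whole array with min()/index() for every customer;
-- objective: alternative algorithm, same asymptotic cost.

-- ===== PORT A =====
-- loop body of A: queue[queue.index(min(queue))] += customer
def pvAStep (q : List Int) (customer : Int) : List Int :=
  match PySem.List.min? q (fun x => x) with
  | none => q            -- min([]) raises ValueError; excluded by Pre_
  | some m =>
    match PySem.List.index? q m with
    | none => q          -- unreachable: m ∈ q
    | some i => q.set i (q.getD i 0 + customer)

def queue_time (customers : List Int) (n : Int) : Int :=
  if n = 1 then customers.sum
  else if n ≥ (customers.length : Int) then
    (PySem.List.max? customers (fun x => x)).getD 0   -- max([]) raises; excluded by Pre_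
  else
    let queue := List.replicate n.toNat 0
    let queue := customers.foldl pvAStep queue
    (PySem.List.max? queue (fun x => x)).getD 0

-- ===== PORT B =====
-- B's while loop: number of leading elements of `rest` that are < t (the insertion point)
def pvInsIdx (t : Int) : List Int → Nat
  | [] => 0
  | x :: xs => if x < t then pvInsIdx t xs + 1 else 0

-- loop body of B: t = loads[0] + c; rest = loads[1:]; loads = rest[:i] + [t] + rest[i:]
def pvBStep (l : List Int) (c : Int) : List Int :=
  let t := (PySem.List.pyGet? l 0).getD 0 + c      -- loads[0] raises on empty; excluded by Pre_
  let rest := PySem.List.slice l (some 1) none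
  let i := pvInsIdx t rest
  rest.take i ++ [t] ++ rest.drop i

def queue_time_alt (customers : List Int) (n : Int) : Int :=
  if n = 1 then customers.sum
  else if n ≥ (customers.length : Int) then
    (PySem.List.max? customers (fun x => x)).getD 0
  else
    let loads := List.replicate n.toNat 0
    let loads := customers.foldl pvBStep loads
    (PySem.List.pyGet? loads (-1)).getD 0           -- loads[-1]

-- ===== PRECONDITION & SPEC =====
-- Pre_ excludes exactly the inputs where A raises: n < 1 (min()/max() of an empty till list)
-- and empty customers with n ≠ 1 (max([]) raises ValueError).
def Pre_queue_time (customers : List Int) (n : Int) : Prop :=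
  1 ≤ n ∧ (customers ≠ [] ∨ n = 1)
instance (customers : List Int) (n : Int) : Decidable (Pre_queue_time customers n) := by
  unfold Pre_queue_time; infer_instance
def pvWitness_queue_time : List Int × Int := ([2, 3, 10, 4], 2)

def Spec_queue_time (customers : List Int) (n : Int) (out : Int) : Prop := out = queue_time_alt customers n
instance (customers : List Int) (n : Int) (out : Int) : Decidable (Spec_queue_time customers n out) := by unfold Spec_queue_time; infer_instance

-- ===== CLAIM (what is proved, stated in full; the proofs are below) =====
def Claim_equal_queue_time : Prop := ∀ (customers : List Int) (n : Int), Dom_queue_time customers n → Pre_queue_time customers n → Spec_queue_time customers n (queue_time customers n)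

-- ===== LEMMAS AND PROOFS =====

-- B's splice at the insertion point, in structural form
lemma pvBIns_cons (t x : Int) (xs : List Int) :
    (x :: xs).take (pvInsIdx t (x :: xs)) ++ [t] ++ (x :: xs).drop (pvInsIdx t (x :: xs)) =
      if x < t then x :: (xs.take (pvInsIdx t xs) ++ [t] ++ xs.drop (pvInsIdx t xs))
      else t :: x :: xs := by
  by_cases h : x < t <;> simp [pvInsIdx, h]

lemma pvBIns_perm (t : Int) (l : List Int) :
    (l.take (pvInsIdx t l) ++ [t] ++ l.drop (pvInsIdx t l)).Perm (t :: l) := by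
  induction l with
  | nil => simp [pvInsIdx]
  | cons x xs ih =>
    rw [pvBIns_cons]
    by_cases h : x < t
    · simp only [if_pos h]
      exact ((ih.cons x).trans (List.Perm.swap t x xs)).symm.symm
    · simp [h]

lemma pvBIns_mem {t y : Int} {l : List Int}
    (hy : y ∈ l.take (pvInsIdx t l) ++ [t] ++ l.drop (pvInsIdx t l)) : y = t ∨ y ∈ l := by
  have := (pvBIns_perm t l).mem_iff.mp hy
  simpa using this

lemma pvBIns_sorted (t : Int) (l : List Int) (h : l.Pairwise (· ≤ ·)) :
    (l.take (pvInsIdx t l) ++ [t] ++ l.drop (pvInsIdx t l)).Pairwise (· ≤ ·) := by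
  induction l with
  | nil => simp [pvInsIdx, List.pairwise_cons]
  | cons x xs ih =>
    rw [List.pairwise_cons] at h
    obtain ⟨hx, hxs⟩ := h
    rw [pvBIns_cons]
    by_cases hlt : x < t
    · simp only [if_pos hlt]
      rw [List.pairwise_cons]
      refine ⟨?_, ih hxs⟩
      intro b hb
      rcases pvBIns_mem hb with rfl | hb'
      · exact le_of_lt hlt
      · exact hx b hb'
    · simp only [if_neg hlt]
      rw [List.pairwise_cons]
      refine ⟨?_, by rw [List.pairwise_cons]; exact ⟨hx, hxs⟩⟩
      intro b hb
      rcases List.mem_cons.mp hb with rfl | hb'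
      · exact not_lt.mp hlt
      · exact le_trans (not_lt.mp hlt) (hx b hb')

lemma pvSet_append_len (pre suf : List Int) (h v : Int) :
    (pre ++ h :: suf).set pre.length v = pre ++ v :: suf := by
  induction pre with
  | nil => simp
  | cons p ps ih => simp [List.set, ih]

lemma pvGetD_append_len (pre suf : List Int) (h : Int) :
    (pre ++ h :: suf).getD pre.length 0 = h := by
  induction pre with
  | nil => simp
  | cons p ps ih => simpa using ih

-- A's loop body rewrites the multiset: one minimum goes out, minimum + c comes in
lemma pvAStep_perm (q : List Int) (c h : Int) (t : List Int)
    (hperm : q.Perm (h :: t)) (hsort : (h :: t).Pairwise (· ≤ ·)) :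
    (pvAStep q c).Perm ((h + c) :: t) := by
  have hqne : q ≠ [] := by
    intro hq; subst hq
    have := hperm.length_eq; simp at this
  obtain ⟨m, hm⟩ : ∃ m, PySem.List.min? q (fun x => x) = some m := by
    cases hmq : PySem.List.min? q (fun x => x) with
    | none => exact absurd ((PySem.List.min?_eq_none_iff q (fun x => x)).mp hmq) hqne
    | some m => exact ⟨m, rfl⟩
  have hmmem : m ∈ q := PySem.List.min?_mem hm
  have hmin : ∀ y ∈ q, m ≤ y := fun y hy => PySem.List.min?_isMin hm y hy
  -- the minimum of q is the head of its sorted rearrangement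
  have hhm : m = h := by
    have h1 : m ≤ h := hmin h (hperm.symm.mem_iff.mp (List.mem_cons_self))
    have hmem2 : m ∈ h :: t := hperm.mem_iff.mp hmmem
    rw [List.pairwise_cons] at hsort
    rcases List.mem_cons.mp hmem2 with rfl | hmt
    · rfl
    · exact le_antisymm h1 (hsort.1 m hmt)
  subst hhm
  obtain ⟨i, hi⟩ : ∃ i, PySem.List.index? q m = some i := by
    cases hiq : PySem.List.index? q m with
    | none => exact absurd ((PySem.List.index?_eq_none_iff q m).mp hiq) (not_not_intro hmmem)
    | some i => exact ⟨i, rfl⟩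
  obtain ⟨pre, suf, hq, hlen, -⟩ := (PySem.List.index?_eq_some_iff q m i).mp hi
  subst hq
  simp only [pvAStep, hm, hi]
  rw [← hlen, pvSet_append_len, pvGetD_append_len]
  -- pre ++ (m+c) :: suf ~ (m+c) :: (pre ++ suf) ~ (m+c) :: t
  refine List.perm_middle.trans (List.Perm.cons _ ?_)
  have : (m :: (pre ++ suf)).Perm (m :: t) := List.perm_middle.symm.trans hperm
  exact this.cons_inv

lemma pvBStep_eq (h c : Int) (t : List Int) :
    pvBStep (h :: t) c =
      t.take (pvInsIdx (h + c) t) ++ [h + c] ++ t.drop (pvInsIdx (h + c) t) := by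
  simp [pvBStep, PySem.List.pyGet?_zero_cons, PySem.List.slice_from_one]

-- loop invariant: A's queue stays a permutation of B's loads; B's loads stay sorted, nonempty
lemma pvFold_inv (cs : List Int) :
    ∀ (q l : List Int), q.Perm l → l.Pairwise (· ≤ ·) → l ≠ [] →
      (cs.foldl pvAStep q).Perm (cs.foldl pvBStep l) ∧
        (cs.foldl pvBStep l).Pairwise (· ≤ ·) ∧ cs.foldl pvBStep l ≠ [] := by
  induction cs with
  | nil => intro q l hperm hsort hne; exact ⟨hperm, hsort, hne⟩
  | cons c cs ih =>
    intro q l hperm hsort hne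
    obtain ⟨h, t, rfl⟩ : ∃ h t, l = h :: t := by
      cases l with
      | nil => exact absurd rfl hne
      | cons h t => exact ⟨h, t, rfl⟩
    have hsort' : t.Pairwise (· ≤ ·) := (List.pairwise_cons.mp hsort).2
    have hb := pvBStep_eq h c t
    have hperm' : (pvAStep q c).Perm (pvBStep (h :: t) c) := by
      rw [hb]
      exact (pvAStep_perm q c h t hperm hsort).trans (pvBIns_perm (h + c) t).symm
    have hsortb : (pvBStep (h :: t) c).Pairwise (· ≤ ·) := by
      rw [hb]; exact pvBIns_sorted (h + c) t hsort'
    have hneb : pvBStep (h :: t) c ≠ [] := by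
      intro hnil
      have := (pvBIns_perm (h + c) t).symm.length_eq
      rw [← hb, hnil] at this
      simp at this
    simpa using ih (pvAStep q c) (pvBStep (h :: t) c) hperm' hsortb hneb

lemma pvLe_getLast_of_sorted (l : List Int) (hs : l.Pairwise (· ≤ ·)) (hne : l ≠ []) :
    ∀ x ∈ l, x ≤ l.getLast hne := by
  induction l with
  | nil => exact absurd rfl hne
  | cons a l ih =>
    rw [List.pairwise_cons] at hs
    intro x hx
    cases l with
    | nil => simp at hx; simp [hx]
    | cons b l' =>
      rw [List.getLast_cons (by simp)]
      rcases List.mem_cons.mp hx with rfl | hx'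
      · exact le_trans (hs.1 b List.mem_cons_self)
          (ih hs.2 (by simp) b List.mem_cons_self)
      · exact ih hs.2 (by simp) x hx'

-- max(q) of A equals l[-1] of B for a sorted rearrangement l of q
lemma pvMax_eq_last (q l : List Int) (hperm : q.Perm l) (hsort : l.Pairwise (· ≤ ·))
    (hne : l ≠ []) :
    (PySem.List.max? q (fun x => x)).getD 0 = (PySem.List.pyGet? l (-1)).getD 0 := by
  have hqne : q ≠ [] := by
    intro hq; subst hq
    have := hperm.length_eq
    cases l with
    | nil => exact hne rfl
    | cons a l' => simp at this
  obtain ⟨M, hM⟩ : ∃ M, PySem.List.max? q (fun x => x) = some M := by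
    cases hmq : PySem.List.max? q (fun x => x) with
    | none => exact absurd ((PySem.List.max?_eq_none_iff q (fun x => x)).mp hmq) hqne
    | some M => exact ⟨M, rfl⟩
  have hMlast : M = l.getLast hne := by
    have h1 : M ≤ l.getLast hne :=
      pvLe_getLast_of_sorted l hsort hne M (hperm.mem_iff.mp (PySem.List.max?_mem hM))
    have h2 : l.getLast hne ≤ M :=
      PySem.List.max?_isMax hM _ (hperm.symm.mem_iff.mp (List.getLast_mem hne))
    exact le_antisymm h1 h2
  rw [hM, PySem.List.pyGet?_neg_one, List.getLast?_eq_getLast_of_ne_nil hne, hMlast]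

-- ===== VERDICT (by name: the statement is the Claim_ definition above) =====
theorem queue_time_spec : Claim_equal_queue_time := by
  intro customers n _hdom hpre
  obtain ⟨hn1, hcs⟩ := hpre
  unfold Spec_queue_time queue_time queue_time_alt
  by_cases h1 : n = 1
  · simp [h1]
  · simp only [if_neg h1]
    by_cases h2 : n ≥ (customers.length : Int)
    · simp [h2]
    · simp only [if_neg h2]
      have hn2 : 2 ≤ n := by omega
      have hnat : 2 ≤ n.toNat := by omega
      have hne : List.replicate n.toNat (0 : Int) ≠ [] := by
        intro h; have := congrArg List.length h; simp at this; omega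
      have hsort : (List.replicate n.toNat (0 : Int)).Pairwise (· ≤ ·) :=
        List.pairwise_replicate.mpr (Or.inr le_rfl)
      obtain ⟨hperm, hsortb, hneb⟩ :=
        pvFold_inv customers (List.replicate n.toNat 0) (List.replicate n.toNat 0)
          (List.Perm.refl _) hsort hne
      exact pvMax_eq_last _ _ hperm hsortb hneb
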